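-- pv_equiv track=rewrite | github.com/RAVE-V/Tenable-Report | src/processors/grouper.py | calculate_vendor_severity_score
-- ===== SOURCE A (Python) =====
-- from typing import Dict, List, Tuple
--
-- def calculate_vendor_severity_score(vulns: List[Dict]) -> int:
--     """
--     Calculate severity score for a vendor (used for sorting)
--     Critical = 10 points, High = 5 points, Medium = 2 points, Low = 1 point
--
--     Args:
--         vulns: List of vulnerabilities for a vendor
--
--     Returns:
--         Integer severity score
--     """
--     score = 0
--     for vuln in vulns:
--         severity = vuln.get("severity", "").lower()
--         if severity == "critical":
--             score += 10
--         elif severity == "high":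
--             score += 5
--         elif severity == "medium":
--             score += 2
--         elif severity == "low":
--             score += 1
--
--     return score
-- ===== SOURCE B (Python) =====
-- from typing import Dict, List
--
-- def calculate_vendor_severity_score(vulns: List[Dict]) -> int:
--     sevs = [v.get("severity", "").lower() for v in vulns]
--     return (10 * sevs.count("critical")
--             + 5 * sevs.count("high")
--             + 2 * sevs.count("medium")
--             + sevs.count("low"))
-- ===== Notes on version B (the rewrite author's own statement) =====
-- stated objective: idiomatic
-- what changed: Replaces the per-element if-elif accumulator loop with a single map to normalized severities followed by a closed-form weighted sum of four .count tallies.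
import Mathlib
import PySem

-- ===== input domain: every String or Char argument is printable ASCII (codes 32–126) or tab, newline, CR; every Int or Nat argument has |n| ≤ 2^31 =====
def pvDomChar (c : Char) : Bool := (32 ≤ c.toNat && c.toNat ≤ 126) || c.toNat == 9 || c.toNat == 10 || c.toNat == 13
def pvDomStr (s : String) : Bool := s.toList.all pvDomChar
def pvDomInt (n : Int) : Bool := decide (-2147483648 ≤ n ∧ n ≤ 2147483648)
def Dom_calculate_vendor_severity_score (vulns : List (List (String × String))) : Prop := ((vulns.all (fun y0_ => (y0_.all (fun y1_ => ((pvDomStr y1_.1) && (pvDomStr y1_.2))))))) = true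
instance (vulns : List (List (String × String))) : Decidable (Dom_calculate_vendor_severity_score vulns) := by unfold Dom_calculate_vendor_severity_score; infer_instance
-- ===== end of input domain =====

-- B replaces A's per-element if-elif accumulator with one map to lowered severities and a closed-form weighted sum of four counts (idiomatic; same cost).

-- ===== PORT A =====
def calculate_vendor_severity_score (vulns : List (List (String × String))) : Int :=
  vulns.foldl (fun score vuln =>
    let severity := PySem.Str.lower ((PySem.Dict.mk vuln).getD "severity" "")
    if severity = "critical" then score + 10
    else if severity = "high" then score + 5
    else if severity = "medium" then score + 2
    else if severity = "low" then score + 1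
    else score) 0

-- ===== PORT B =====
def calculate_vendor_severity_score_alt (vulns : List (List (String × String))) : Int :=
  let sevs := vulns.map (fun v => PySem.Str.lower ((PySem.Dict.mk v).getD "severity" ""))
  10 * (sevs.count "critical" : Int)
    + 5 * (sevs.count "high" : Int)
    + 2 * (sevs.count "medium" : Int)
    + (sevs.count "low" : Int)

-- ===== PRECONDITION & SPEC =====
def Spec_calculate_vendor_severity_score (vulns : List (List (String × String))) (out : Int) : Prop := out = calculate_vendor_severity_score_alt vulns
instance (vulns : List (List (String × String))) (out : Int) : Decidable (Spec_calculate_vendor_severity_score vulns out) := by unfold Spec_calculate_vendor_severity_score; infer_instance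

-- ===== CLAIM (what is proved, stated in full; the proofs are below) =====
def Claim_equal_calculate_vendor_severity_score : Prop := ∀ (vulns : List (List (String × String))), Dom_calculate_vendor_severity_score vulns → Spec_calculate_vendor_severity_score vulns (calculate_vendor_severity_score vulns)

-- ===== LEMMAS AND PROOFS =====

theorem pv_loop (l : List (List (String × String))) (s : Int) :
    l.foldl (fun score vuln =>
      let severity := PySem.Str.lower ((PySem.Dict.mk vuln).getD "severity" "")
      if severity = "critical" then score + 10
      else if severity = "high" then score + 5
      else if severity = "medium" then score + 2
      else if severity = "low" then score + 1
      else score) s =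
    s + calculate_vendor_severity_score_alt l := by
  induction l generalizing s with
  | nil => simp [calculate_vendor_severity_score_alt]
  | cons v rest ih =>
    rw [List.foldl_cons, ih]
    simp only [calculate_vendor_severity_score_alt, List.map_cons, List.count_cons,
      beq_iff_eq]
    split_ifs with h1 h2 h3 h4 <;> simp_all <;> push_cast <;> ring

theorem calculate_vendor_severity_score_eq (vulns : List (List (String × String))) :
    calculate_vendor_severity_score vulns = calculate_vendor_severity_score_alt vulns := by
  rw [calculate_vendor_severity_score, pv_loop, zero_add]

-- ===== VERDICT (by name: the statement is the Claim_ definition above) =====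
theorem calculate_vendor_severity_score_spec : Claim_equal_calculate_vendor_severity_score := by
  intro vulns _
  exact calculate_vendor_severity_score_eq vulns
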